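-- pv_equiv track=rewrite | github.com/salesforce/pomgen | src/common/code.py | _find_name_start_index
-- ===== SOURCE A (Python) =====
-- def _find_name_start_index(content, equals_index):
--     within_name = False
--     for i in range(equals_index-1, 0, -1):
--         if content[i] in (" ", "\t", "\n"):
--             if within_name:
--                 return i + 1
--         else:
--             if not within_name:
--                 within_name = True
-- ===== SOURCE B (Python) =====
-- def _find_name_start_index(content, equals_index):
--     # Locate the name before '=' with library string ops on the region
--     # content[1:equals_index] (index 0 is never inspected, matching the task's
--     # ">= 2 result" contract).  Return value only; no mutation.
--     if equals_index <= 1: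
--         return None
--     region = content[1:equals_index]
--     stripped = region.rstrip(" \t\n")
--     if not stripped:
--         return None
--     k = max(stripped.rfind(" "), stripped.rfind("\t"), stripped.rfind("\n"))
--     if k == -1:
--         return None
--     return k + 2
-- ===== Notes on version B (the rewrite author's own statement) =====
-- stated objective: idiomatic
-- what changed: Replaces the manual backward two-state scan with library string operations: slice the region content[1:equals_index], rstrip the three whitespace characters, and take the last whitespace position via rfind.
import Mathlib
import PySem

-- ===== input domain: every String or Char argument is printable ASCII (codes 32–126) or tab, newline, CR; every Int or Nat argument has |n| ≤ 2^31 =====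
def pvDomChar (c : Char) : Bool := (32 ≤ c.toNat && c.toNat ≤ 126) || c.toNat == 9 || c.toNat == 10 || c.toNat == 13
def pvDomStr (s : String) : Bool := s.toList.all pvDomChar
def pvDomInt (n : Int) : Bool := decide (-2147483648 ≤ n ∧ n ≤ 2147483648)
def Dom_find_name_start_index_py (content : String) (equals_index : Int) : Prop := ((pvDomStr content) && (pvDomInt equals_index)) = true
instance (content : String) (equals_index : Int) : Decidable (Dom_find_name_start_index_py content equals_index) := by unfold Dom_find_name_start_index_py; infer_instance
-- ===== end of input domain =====

-- B replaces A's backward two-state scan with library string operations on the region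
-- content[1:equals_index] (rstrip the three whitespace chars, then the last-whitespace
-- position via rfind); objective: alternative/idiomatic. Return value only (A mutates nothing).

-- ===== PORT A =====
-- the backward loop 'for i in range(equals_index-1, 0, -1)' with the within_name flag
def pvGoA (content : String) : List Int → Bool → Option Int
  | [], _ => none
  | i :: rest, within_name =>
    match PySem.Str.pyGet? content i with
    | none => none  -- IndexError (excluded by Pre_)
    | some c =>
      if c = ' ' || c = '\t' || c = '\n' then
        if within_name then some (i + 1) else pvGoA content rest within_name
      else
        pvGoA content rest true

def find_name_start_index_py (content : String) (equals_index : Int) : Option Int :=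
  pvGoA content (PySem.List.pyRange (equals_index - 1) 0 (-1)) false

-- ===== PORT B =====
-- hand port of str.rstrip(" \t\n") (exact: drops trailing chars of that set)
def pvRstripWs (cs : List Char) : List Char :=
  (cs.reverse.dropWhile (fun c => c = ' ' || c = '\t' || c = '\n')).reverse

def find_name_start_index_py_alt (content : String) (equals_index : Int) : Option Int :=
  if equals_index ≤ 1 then none
  else
    let region := PySem.List.slice content.toList (some 1) (some equals_index)
    let stripped := pvRstripWs region
    if stripped = [] then none
    else
      let k := max (max (PySem.Chars.rfind stripped [' ']) (PySem.Chars.rfind stripped ['\t']))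
                   (PySem.Chars.rfind stripped ['\n'])
      if k = -1 then none else some (k + 2)

-- ===== PRECONDITION & SPEC =====
-- A raises IndexError exactly when 2 ≤ equals_index and equals_index > len(content);
-- Pre_ excludes exactly those inputs and nothing else (A returns on every input in Pre_).
def Pre_find_name_start_index_py (content : String) (equals_index : Int) : Prop :=
  equals_index ≤ (content.toList.length : Int) ∨ equals_index ≤ 1
instance (content : String) (equals_index : Int) : Decidable (Pre_find_name_start_index_py content equals_index) := by unfold Pre_find_name_start_index_py; infer_instance

def pvWitness_find_name_start_index_py : String × Int := ("x a=1", 3)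

def Spec_find_name_start_index_py (content : String) (equals_index : Int) (out : Option Int) : Prop := out = find_name_start_index_py_alt content equals_index
instance (content : String) (equals_index : Int) (out : Option Int) : Decidable (Spec_find_name_start_index_py content equals_index out) := by unfold Spec_find_name_start_index_py; infer_instance

-- ===== CLAIM (what is proved, stated in full; the proofs are below) =====
def Claim_equal_find_name_start_index_py : Prop := ∀ (content : String) (equals_index : Int), Dom_find_name_start_index_py content equals_index → Pre_find_name_start_index_py content equals_index → Spec_find_name_start_index_py content equals_index (find_name_start_index_py content equals_index)


-- ===== LEMMAS AND PROOFS =====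

-- the whitespace test both programs use, as a named predicate
def pvWs (c : Char) : Bool := c = ' ' || c = '\t' || c = '\n'

-- A's loop, abstracted to the reversed region (positions instead of indices)
def pvMachine : List Char → Bool → Option Nat
  | [], _ => none
  | c :: rest, w =>
    if pvWs c then (if w then some 0 else (pvMachine rest w).map (· + 1))
    else (pvMachine rest true).map (· + 1)

lemma pvMachine_true (l : List Char) : pvMachine l true = l.findIdx? pvWs := by
  induction l with
  | nil => rfl
  | cons c rest ih =>
    by_cases h : pvWs c <;> simp [pvMachine, List.findIdx?_cons, ih, h]

lemma pvMachine_false (l : List Char) :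
    pvMachine l false
      = ((l.dropWhile pvWs).findIdx? pvWs).map
          (fun q => q + (l.length - (l.dropWhile pvWs).length)) := by
  induction l with
  | nil => rfl
  | cons c rest ih =>
    by_cases h : pvWs c
    · simp [pvMachine, h, ih, Option.map_map]
      have hle : (rest.dropWhile pvWs).length ≤ rest.length := List.length_dropWhile_le _ _
      congr 1; funext q; simp; omega
    · simp only [pvMachine, h, Bool.false_eq_true, if_false, pvMachine_true,
        List.dropWhile_cons_of_neg h, List.findIdx?_cons, h, List.length_cons,
        Option.map_map]
      congr 1
      funext q; simp

lemma pvGoA_range (content : String) (n : Nat) (hn : n < content.toList.length) (w : Bool) :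
    pvGoA content (PySem.List.pyRange (n : Int) 0 (-1)) w
      = (pvMachine (((content.toList.drop 1).take n).reverse) w).map
          (fun p => (n : Int) - (p : Int) + 1) := by
  induction n generalizing w with
  | zero =>
    rw [PySem.List.pyRange_neg_one_eq_nil (by norm_num)]
    simp [pvGoA, pvMachine]
  | succ m ih =>
    have hm1 : m + 1 < content.toList.length := hn
    have hdlen : m < (content.toList.drop 1).length := by
      rw [List.length_drop]; omega
    have hget : PySem.Str.pyGet? content ((m + 1 : Nat) : Int)
        = some (content.toList[m + 1]) := by
      rw [PySem.Str.pyGet?_natCast, List.getElem?_eq_getElem hm1]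
    have hcons : PySem.List.pyRange ((m + 1 : Nat) : Int) 0 (-1)
        = ((m + 1 : Nat) : Int) :: PySem.List.pyRange ((m : Nat) : Int) 0 (-1) := by
      rw [PySem.List.pyRange_neg_one_cons (by exact_mod_cast Nat.succ_pos m)]
      norm_num
    have htake : (content.toList.drop 1).take (m + 1)
        = (content.toList.drop 1).take m ++ [content.toList[m + 1]] := by
      rw [List.take_add_one, List.getElem?_eq_getElem hdlen]
      simp
    have ihm := ih (by omega)
    rw [hcons, htake]
    simp only [List.reverse_append, List.reverse_singleton, List.singleton_append]
    simp only [pvGoA, hget]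
    by_cases hws : pvWs (content.toList[m + 1])
    · have hws' : (content.toList[m + 1] = ' ' || content.toList[m + 1] = '\t'
          || content.toList[m + 1] = '\n') = true := hws
      rw [hws']
      cases w with
      | true =>
        simp only [pvMachine, hws, if_true, Option.map_some]
        simp
      | false =>
        simp only [pvMachine, hws, Bool.false_eq_true, if_true, if_false]
        rw [ihm false]
        cases hM : pvMachine ((content.toList.drop 1).take m).reverse false with
        | none => simp
        | some p => simp
    · have hws' : (content.toList[m + 1] = ' ' || content.toList[m + 1] = '\t'
          || content.toList[m + 1] = '\n') = false := by
        simpa [pvWs] using hws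
      rw [hws']
      simp only [Bool.false_eq_true, if_false, pvMachine, hws]
      rw [ihm true]
      cases hM : pvMachine ((content.toList.drop 1).take m).reverse true with
      | none => simp
      | some p => simp

lemma pvGo_zero (s sub : List Char) :
    PySem.Chars.rfind.go s sub 0 = if sub.isPrefixOf s then 0 else -1 := by
  simp [PySem.Chars.rfind.go]

lemma pvGo_succ (s sub : List Char) (j : Nat) :
    PySem.Chars.rfind.go s sub (j + 1)
      = if sub.isPrefixOf (s.drop (j + 1)) then ((j : Int) + 1) else PySem.Chars.rfind.go s sub j := by
  simp [PySem.Chars.rfind.go]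

lemma pvPrefix_single (c : Char) (l : List Char) :
    [c].isPrefixOf l = true ↔ l[0]? = some c := by
  rw [List.isPrefixOf_iff_prefix]
  cases l with
  | nil => simp
  | cons x t => simp [List.cons_prefix_iff, eq_comm]

lemma pvGo_le (s sub : List Char) (n : Nat) : PySem.Chars.rfind.go s sub n ≤ (n : Int) := by
  induction n with
  | zero => rw [pvGo_zero]; split <;> omega
  | succ j ih => rw [pvGo_succ]; split <;> [omega; (push_cast; omega)]

lemma pvGo_append (s : List Char) (a c : Char) (n : Nat) (hn : n < s.length) :
    PySem.Chars.rfind.go (s ++ [a]) [c] n = PySem.Chars.rfind.go s [c] n := by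
  induction n with
  | zero =>
    rw [pvGo_zero, pvGo_zero]
    have : ([c].isPrefixOf (s ++ [a])) = ([c].isPrefixOf s) := by
      rw [Bool.eq_iff_iff, pvPrefix_single, pvPrefix_single,
        List.getElem?_append_left (by omega)]
    rw [this]
  | succ j ih =>
    rw [pvGo_succ, pvGo_succ]
    have : ([c].isPrefixOf ((s ++ [a]).drop (j + 1))) = ([c].isPrefixOf (s.drop (j + 1))) := by
      rw [Bool.eq_iff_iff, pvPrefix_single, pvPrefix_single,
        List.getElem?_drop, List.getElem?_drop,
        List.getElem?_append_left (by omega)]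
    rw [this, ih (by omega)]

lemma pvDrop_len_nil (s : List Char) (n : Nat) (h : s.length ≤ n) : s.drop n = [] :=
  List.drop_eq_nil_of_le h

lemma pvRfind_single_le (s : List Char) (c : Char) :
    PySem.Chars.rfind s [c] ≤ (s.length : Int) - 1 := by
  unfold PySem.Chars.rfind
  cases hs : s.length with
  | zero =>
    have : s = [] := List.eq_nil_of_length_eq_zero hs
    subst this
    rw [pvGo_zero]
    simp [List.isPrefixOf]
  | succ j =>
    rw [pvGo_succ, pvDrop_len_nil s (j + 1) (by omega)]
    have := pvGo_le s [c] j
    simp [List.isPrefixOf]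
    push_cast
    omega

lemma pvRfind_append_singleton (s : List Char) (a c : Char) :
    PySem.Chars.rfind (s ++ [a]) [c]
      = if a = c then (s.length : Int) else PySem.Chars.rfind s [c] := by
  unfold PySem.Chars.rfind
  rw [List.length_append, List.length_cons, List.length_nil]
  rw [show s.length + (0 + 1) = s.length + 1 by omega]
  rw [pvGo_succ, pvDrop_len_nil (s ++ [a]) (s.length + 1) (by simp)]
  rw [show ([c].isPrefixOf ([] : List Char)) = false by rfl]
  simp only [Bool.false_eq_true, if_false]
  cases hs : s.length with
  | zero =>
    have : s = [] := List.eq_nil_of_length_eq_zero hs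
    subst this
    rw [pvGo_zero, pvGo_zero]
    simp only [List.nil_append]
    by_cases hac : a = c
    · subst hac
      have h1 : ([a].isPrefixOf [a]) = true := (pvPrefix_single a [a]).2 (by simp)
      simp [h1]
    · have h1 : ([c].isPrefixOf [a]) = false := by
        rw [Bool.eq_false_iff]
        intro h
        have h0 := (pvPrefix_single c [a]).1 h
        simp at h0
        exact hac h0
      have h2 : ([c].isPrefixOf ([] : List Char)) = false := rfl
      simp [h1, h2, hac]
  | succ j =>
    rw [pvGo_succ, pvGo_succ, pvDrop_len_nil s (j + 1) (by omega)]
    rw [show ([c].isPrefixOf ([] : List Char)) = false by rfl]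
    have hdrop : (s ++ [a]).drop (j + 1) = [a] := by
      rw [List.drop_append_of_le_length (by omega), pvDrop_len_nil s (j + 1) (by omega)]
      simp
    rw [hdrop]
    simp only [Bool.false_eq_true, if_false]
    by_cases hac : a = c
    · subst hac
      have h1 : ([a].isPrefixOf [a]) = true := (pvPrefix_single a [a]).2 (by simp)
      simp [h1, hs]
    · have h1 : ([c].isPrefixOf [a]) = false := by
        rw [Bool.eq_false_iff]
        intro h
        have h0 := (pvPrefix_single c [a]).1 h
        simp at h0
        exact hac h0
      rw [h1]
      simp only [Bool.false_eq_true, if_false]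
      rw [pvGo_append s a c j (by omega)]
      simp [hac]

lemma pvRfind_nil (c : Char) : PySem.Chars.rfind [] [c] = -1 := by
  unfold PySem.Chars.rfind
  simp only [List.length_nil]
  rw [pvGo_zero]
  rfl

lemma pvMax3_eq (s : List Char) :
    max (max (PySem.Chars.rfind s [' ']) (PySem.Chars.rfind s ['\t'])) (PySem.Chars.rfind s ['\n'])
      = (match s.reverse.findIdx? pvWs with
         | none => (-1 : Int)
         | some q => (s.length : Int) - 1 - q) := by
  induction s using List.reverseRecOn with
  | nil => simp [pvRfind_nil]
  | append_singleton s a ih =>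
    rw [pvRfind_append_singleton, pvRfind_append_singleton, pvRfind_append_singleton]
    rw [List.reverse_append, List.reverse_singleton, List.singleton_append, List.findIdx?_cons]
    have hbound1 := pvRfind_single_le s (' ' : Char)
    have hbound2 := pvRfind_single_le s ('\t' : Char)
    have hbound3 := pvRfind_single_le s ('\n' : Char)
    by_cases hws : pvWs a
    · have ha : a = ' ' ∨ a = '\t' ∨ a = '\n' := by
        simp [pvWs] at hws
        tauto
      simp only [hws, if_true, List.length_append, List.length_cons, List.length_nil]
      rcases ha with h | h | h <;> subst h
      · rw [if_pos rfl, if_neg (by decide), if_neg (by decide)]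
        rw [max_eq_left (by omega : PySem.Chars.rfind s ['\t'] ≤ (s.length : Int)),
          max_eq_left (by omega : PySem.Chars.rfind s ['\n'] ≤ (s.length : Int))]
        push_cast
        ring
      · rw [if_neg (by decide), if_pos rfl, if_neg (by decide)]
        rw [max_eq_right (by omega : PySem.Chars.rfind s [' '] ≤ (s.length : Int)),
          max_eq_left (by omega : PySem.Chars.rfind s ['\n'] ≤ (s.length : Int))]
        push_cast
        ring
      · rw [if_neg (by decide), if_neg (by decide), if_pos rfl]
        rw [max_eq_right (by omega : max (PySem.Chars.rfind s [' ']) (PySem.Chars.rfind s ['\t']) ≤ (s.length : Int))]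
        push_cast
        ring
    · have hwsf : pvWs a = false := by simpa using hws
      rw [hwsf]
      simp only [Bool.false_eq_true, if_false]
      have hne1 : ¬ (a = ' ') := by intro h; subst h; simp [pvWs] at hws
      have hne2 : ¬ (a = '\t') := by intro h; subst h; simp [pvWs] at hws
      have hne3 : ¬ (a = '\n') := by intro h; subst h; simp [pvWs] at hws
      rw [if_neg hne1, if_neg hne2, if_neg hne3, ih]
      cases hF : s.reverse.findIdx? pvWs with
      | none => simp
      | some q =>
        simp only [Option.map_some]
        simp
        push_cast
        ring

lemma pvMain (content : String) (equals_index : Int)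
    (hPre : equals_index ≤ (content.toList.length : Int) ∨ equals_index ≤ 1) :
    find_name_start_index_py content equals_index
      = find_name_start_index_py_alt content equals_index := by
  by_cases he : equals_index ≤ 1
  · unfold find_name_start_index_py find_name_start_index_py_alt
    rw [PySem.List.pyRange_neg_one_eq_nil (by omega)]
    simp [pvGoA, he]
  · have he2 : 2 ≤ equals_index := by omega
    have hlen : equals_index ≤ (content.toList.length : Int) := by
      rcases hPre with h | h
      · exact h
      · omega
    set n : Nat := (equals_index - 1).toNat with hn_def
    have hnn : (n : Int) = equals_index - 1 := by omega
    have hnlen : n < content.toList.length := by omega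
    have hwf : (fun c => c = ' ' || c = '\t' || c = '\n') = pvWs := rfl
    -- A side
    unfold find_name_start_index_py
    rw [← hnn, pvGoA_range content n hnlen false, pvMachine_false]
    -- B side
    unfold find_name_start_index_py_alt
    rw [if_neg he]
    have hslice : PySem.List.slice content.toList (some 1) (some equals_index)
        = (content.toList.drop 1).take n := by
      rw [PySem.List.slice_toNat content.toList (by omega) (by omega)]
      congr 1
      omega
    simp only []
    rw [hslice]
    set region : List Char := (content.toList.drop 1).take n with hreg_def
    have hreglen : region.length = n := by
      rw [hreg_def, List.length_take, List.length_drop]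
      omega
    set l' : List Char := region.reverse.dropWhile pvWs with hl'_def
    have hstr : pvRstripWs region = l'.reverse := by
      rw [pvRstripWs, hwf, hl'_def]
    rw [hstr]
    have hL : l'.length ≤ n := by
      calc l'.length ≤ region.reverse.length := List.length_dropWhile_le _ _
        _ = n := by rw [List.length_reverse, hreglen]
    have hmax : max (max (PySem.Chars.rfind l'.reverse [' ']) (PySem.Chars.rfind l'.reverse ['\t']))
          (PySem.Chars.rfind l'.reverse ['\n'])
        = (match l'.findIdx? pvWs with
           | none => (-1 : Int)
           | some q => (l'.length : Int) - 1 - q) := by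
      rw [pvMax3_eq l'.reverse, List.reverse_reverse, List.length_reverse]
    cases hF : l'.findIdx? pvWs with
    | none =>
      rw [hF] at hmax
      simp only [hF, Option.map_none]
      by_cases hnil : l'.reverse = []
      · rw [if_pos hnil]
        simp
      · rw [if_neg hnil]
        simp only [hmax]
        simp
    | some q =>
      rw [hF] at hmax
      have hq : q < l'.length := List.findIdx?_eq_some_iff_findIdx_eq.1 hF |>.1
      have hnil : l'.reverse ≠ [] := by
        intro h
        rw [List.reverse_eq_nil_iff] at h
        rw [h] at hF
        simp at hF
      rw [if_neg hnil]
      simp only [hF, hmax, Option.map_some]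
      have hk_ne : ((l'.length : Int) - 1 - q) ≠ -1 := by
        have : (l'.length : Int) - 1 - q = ((l'.length : Int) - 1 - q) := rfl
        have hq' : (q : Int) < (l'.length : Int) := by exact_mod_cast hq
        intro hcon
        omega
      rw [if_neg hk_ne]
      rw [List.length_reverse, hreglen]
      have hbind : (do
          let a ← some (q + (n - l'.length))
          pure ((a : Nat) : Int)) = some ((q + (n - l'.length) : Nat) : Int) := rfl
      rw [hbind]
      simp only [Option.map_some]
      congr 1
      push_cast [hL]
      ring

-- ===== VERDICT (by name: the statement is the Claim_ definition above) =====
theorem find_name_start_index_py_spec : Claim_equal_find_name_start_index_py := by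
  intro content equals_index _ hPre
  exact pvMain content equals_index hPre
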